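-- pv_equiv track=rewrite | github.com/rowieg/advent-of-code-23 | days/seven.py | is_three_of_a_kind
-- ===== SOURCE A (Python) =====
-- def is_three_of_a_kind(hand):
--     for card in hand:
--         if "J" in hand:
--             if hand.count(card) == 2 and len(list(set(hand))) > 3:
--                 return True
--         if hand.count(card) == 3 and len(list(set(hand))) > 2:
--             return True
--     return False
-- ===== SOURCE B (Python) =====
-- def is_three_of_a_kind(hand):
--     counts = {}
--     for card in hand:
--         counts[card] = counts.get(card, 0) + 1
--     vals = counts.values()
--     distinct = len(counts)
--     return (3 in vals and distinct > 2) or ('J' in hand and 2 in vals and distinct > 3)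
-- ===== Notes on version B (the rewrite author's own statement) =====
-- stated objective: faster
-- what changed: Replaces A's per-card loop with repeated hand.count and set(hand) rescans by building one count table in a single pass and classifying its shape (3 in values / 2 in values plus distinct-count thresholds).
import Mathlib
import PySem

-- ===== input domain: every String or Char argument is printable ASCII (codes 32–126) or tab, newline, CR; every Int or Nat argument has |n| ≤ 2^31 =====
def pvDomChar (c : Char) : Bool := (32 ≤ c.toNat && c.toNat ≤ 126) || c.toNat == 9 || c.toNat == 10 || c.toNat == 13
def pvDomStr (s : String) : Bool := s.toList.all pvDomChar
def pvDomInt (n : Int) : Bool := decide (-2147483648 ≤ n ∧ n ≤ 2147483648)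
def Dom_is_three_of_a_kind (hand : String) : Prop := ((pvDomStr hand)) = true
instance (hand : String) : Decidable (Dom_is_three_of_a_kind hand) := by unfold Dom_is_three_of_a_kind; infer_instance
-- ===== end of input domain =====

-- B builds one count table in a single pass and classifies its shape instead of rescanning the hand per card (simpler).

-- ===== PORT A =====
-- the 'for card in hand' loop with its early returns, step for step
def isThreeLoopA (hand : String) : List Char → Bool
  | [] => false
  | card :: rest =>
    if PySem.Str.isIn "J" hand = true ∧
        PySem.Str.count hand (String.ofList [card]) = 2 ∧
        (PySem.Set.ofList hand.toList).length > 3 then true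
    else if PySem.Str.count hand (String.ofList [card]) = 3 ∧
        (PySem.Set.ofList hand.toList).length > 2 then true
    else isThreeLoopA hand rest

def is_three_of_a_kind (hand : String) : Bool :=
  isThreeLoopA hand hand.toList

-- ===== PORT B =====
def is_three_of_a_kind_alt (hand : String) : Bool :=
  let counts : PySem.Dict Char Int :=
    hand.toList.foldl (fun d x => d.insert x (d.getD x 0 + 1)) PySem.Dict.empty
  let vals := counts.values
  let distinct := counts.size
  (vals.contains 3 && decide (distinct > 2)) ||
    (PySem.Str.isIn "J" hand && vals.contains 2 && decide (distinct > 3))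

-- ===== PRECONDITION & SPEC =====
def Spec_is_three_of_a_kind (hand : String) (out : Bool) : Prop := out = is_three_of_a_kind_alt hand
instance (hand : String) (out : Bool) : Decidable (Spec_is_three_of_a_kind hand out) := by unfold Spec_is_three_of_a_kind; infer_instance

-- ===== CLAIM (what is proved, stated in full; the proofs are below) =====
def Claim_equal_is_three_of_a_kind : Prop := ∀ (hand : String), Dom_is_three_of_a_kind hand → Spec_is_three_of_a_kind hand (is_three_of_a_kind hand)

-- ===== LEMMAS AND PROOFS =====

-- Python's count of a 1-character substring is the list count of that character
lemma count_go_singleton (c : Char) (l : List Char) :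
    ∀ (fuel acc : Nat), l.length ≤ fuel →
      PySem.Chars.count.go [c] fuel l acc = acc + l.count c := by
  induction l with
  | nil => intro fuel acc _; cases fuel <;> simp [PySem.Chars.count.go]
  | cons h t ih =>
    intro fuel acc hf
    cases fuel with
    | zero => simp at hf
    | succ n =>
      rw [PySem.Chars.count.go]
      simp only [List.isPrefixOf, List.count_cons]
      by_cases hc : c == h
      · have : (h == c) = true := by
          simp at hc; simp [hc]
        simp [hc, this, ih n (acc + 1) (by simpa using hf)]
        omega
      · have : (h == c) = false := by
          simp at hc ⊢; exact fun e => hc e.symm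
        simp [hc, this, ih n acc (by simp at hf; omega)]

lemma chars_count_singleton (cs : List Char) (c : Char) :
    PySem.Chars.count cs [c] = cs.count c := by
  have := count_go_singleton c cs cs.length 0 le_rfl
  simpa [PySem.Chars.count] using this

-- characterisation of A's loop
lemma isThreeLoopA_iff (hand : String) (l : List Char) :
    isThreeLoopA hand l = true ↔
      ∃ c ∈ l,
        (PySem.Str.isIn "J" hand = true ∧ hand.toList.count c = 2 ∧
          (PySem.Set.ofList hand.toList).length > 3) ∨
        (hand.toList.count c = 3 ∧ (PySem.Set.ofList hand.toList).length > 2) := by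
  induction l with
  | nil => simp [isThreeLoopA]
  | cons card rest ih =>
    simp only [isThreeLoopA]
    split_ifs with h1 h2
    · simp only [true_iff]
      exact ⟨card, List.mem_cons_self .., Or.inl (by simpa [PySem.Str.count_eq, String.toList_ofList, chars_count_singleton] using h1)⟩
    · simp only [true_iff]
      exact ⟨card, List.mem_cons_self .., Or.inr (by simpa [PySem.Str.count_eq, String.toList_ofList, chars_count_singleton] using h2)⟩
    · rw [ih]
      constructor
      · rintro ⟨c, hc, hp⟩; exact ⟨c, List.mem_cons_of_mem _ hc, hp⟩
      · rintro ⟨c, hc, hp⟩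
        rcases List.mem_cons.mp hc with rfl | hc'
        · exfalso
          rcases hp with hA | hB
          · exact h1 (by simpa [PySem.Str.count_eq, String.toList_ofList, chars_count_singleton] using hA)
          · exact h2 (by simpa [PySem.Str.count_eq, String.toList_ofList, chars_count_singleton] using hB)
        · exact ⟨c, hc', hp⟩

-- characterisation of B
lemma alt_iff (hand : String) :
    is_three_of_a_kind_alt hand = true ↔
      ((∃ c ∈ hand.toList, hand.toList.count c = 3) ∧
        (PySem.Set.ofList hand.toList).length > 2) ∨
      (PySem.Str.isIn "J" hand = true ∧
        (∃ c ∈ hand.toList, hand.toList.count c = 2) ∧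
        (PySem.Set.ofList hand.toList).length > 3) := by
  unfold is_three_of_a_kind_alt
  rw [PySem.Dict.foldl_insert_getD_add_one_eq_counter]
  simp only [PySem.Dict.values, PySem.Dict.size, PySem.Dict.items_counter,
    List.map_map, List.length_map, Bool.or_eq_true, Bool.and_eq_true,
    List.contains_eq_mem, decide_eq_true_eq, List.mem_map, Function.comp]
  constructor
  · rintro (⟨⟨c, hc, hv⟩, hd⟩ | ⟨⟨hJ, c, hc, hv⟩, hd⟩)
    · exact Or.inl ⟨⟨c, (PySem.Set.mem_ofList _ _).mp hc, by exact_mod_cast hv⟩, hd⟩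
    · exact Or.inr ⟨hJ, ⟨c, (PySem.Set.mem_ofList _ _).mp hc, by exact_mod_cast hv⟩, hd⟩
  · rintro (⟨⟨c, hc, hv⟩, hd⟩ | ⟨hJ, ⟨c, hc, hv⟩, hd⟩)
    · exact Or.inl ⟨⟨c, (PySem.Set.mem_ofList _ _).mpr hc, by exact_mod_cast hv⟩, hd⟩
    · exact Or.inr ⟨⟨hJ, c, (PySem.Set.mem_ofList _ _).mpr hc, by exact_mod_cast hv⟩, hd⟩

-- ===== VERDICT (by name: the statement is the Claim_ definition above) =====
theorem is_three_of_a_kind_spec : Claim_equal_is_three_of_a_kind := by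
  intro hand _
  unfold Spec_is_three_of_a_kind
  rw [Bool.eq_iff_iff]
  unfold is_three_of_a_kind
  rw [isThreeLoopA_iff, alt_iff]
  constructor
  · rintro ⟨c, hc, (⟨hJ, h2, h3⟩ | ⟨h3, h2⟩)⟩
    · exact Or.inr ⟨hJ, ⟨c, hc, h2⟩, h3⟩
    · exact Or.inl ⟨⟨c, hc, h3⟩, h2⟩
  · rintro (⟨⟨c, hc, h3⟩, h2⟩ | ⟨hJ, ⟨c, hc, h2⟩, h3⟩)
    · exact ⟨c, hc, Or.inr ⟨h3, h2⟩⟩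
    · exact ⟨c, hc, Or.inl ⟨hJ, h2, h3⟩⟩
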